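-- pv_equiv track=rewrite | github.com/allen-cell-animated/abm-shape-collection | src/abm_shape_collection/extract_voxel_contours.py | connect_array_edges
-- ===== SOURCE A (Python) =====
-- def connect_array_edges(edges: list[list[tuple[int, int]]]) -> list[list[tuple[int, int]]]:
--     contours: list[list[tuple[int, int]]] = []
--
--     while edges:
--         contour = edges[0]
--         contour_length = 0
--         edges.remove(contour)
--
--         while contour_length != len(contour):
--             contour_length = len(contour)
--
--             forward = list(filter(lambda edge: contour[-1] == edge[0], edges))
--
--             if len(forward) > 0:
--                 edges.remove(forward[0])
--                 contour.extend(forward[0][1:])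
--
--             backward = list(filter(lambda edge: contour[-1] == edge[-1], edges))
--
--             if len(backward) > 0:
--                 edges.remove(backward[0])
--                 contour.extend(list(reversed(backward[0]))[1:])
--
--             if contour_length == len(contour):
--                 contours.append([(x, y) for x, y in contour])
--
--     return sorted(contours, key=len)
-- ===== SOURCE B (Python) =====
-- # B: simulate the chaining on edge INDICES with a used-flag array and per-endpoint
-- # index queues consumed by lazy deletion, then emit contours through a length-bucket
-- # table instead of a sort.  A mutates its argument (empties it and extends its first
-- # member list); B leaves the input unchanged - the equivalence is about return values.
-- def connect_array_edges(edges: list[list[tuple[int, int]]]) -> list[list[tuple[int, int]]]: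
--     n = len(edges)
--     starts: dict = {}  # point -> indices of edges starting there, in index order
--     ends: dict = {}    # point -> indices of edges ending there, in index order
--     for i in range(n):
--         starts.setdefault(edges[i][0], []).append(i)
--         ends.setdefault(edges[i][-1], []).append(i)
--     used = [False] * n
--
--     def take(index, point):
--         # first still-unused edge index queued under this point (lazy deletion)
--         q = index.get(point)
--         if q is None:
--             return None
--         while q and used[q[0]]:
--             q.pop(0)
--         if not q:
--             return None
--         j = q.pop(0)
--         used[j] = True
--         return j
--
--     contours: list[list[tuple[int, int]]] = []
--     for i in range(n):
--         if used[i]: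
--             continue
--         used[i] = True
--         contour = [(x, y) for x, y in edges[i]]
--         while True:
--             before = len(contour)
--             j = take(starts, contour[-1])
--             if j is not None:
--                 contour.extend(edges[j][1:])
--             k = take(ends, contour[-1])
--             if k is not None:
--                 contour.extend(reversed(edges[k][:-1]))
--             if len(contour) == before:
--                 break
--         contours.append(contour)
--
--     buckets: dict = {}  # contour length -> contours of that length, in build order
--     for c in contours:
--         buckets.setdefault(len(c), []).append(c)
--     return [c for length in sorted(buckets) for c in buckets[length]]
-- ===== Notes on version B (the rewrite author's own statement) =====
-- stated objective: faster
-- what changed: B simulates the chaining on edge indices instead of edge lists: endpoint->index queues built once and consumed by lazy deletion against a used-flag array replace A's repeated filter/remove scans of a shrinking list, the outer while-loop with list mutation becomes a for over indices, and a length-bucket table replaces the final sort. Pre_ excludes inputs containing an empty edge: A raises IndexError on most of them and silently drops the empty edges on the rest, while B raises IndexError on any empty edge while indexing endpoints.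
-- outside the precondition, e.g. on connect_array_edges([[]]): A returns [], B raises IndexError; on connect_array_edges([[], [(1, 2)]]): A returns [[(1, 2)]], B raises IndexError
import Mathlib
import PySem

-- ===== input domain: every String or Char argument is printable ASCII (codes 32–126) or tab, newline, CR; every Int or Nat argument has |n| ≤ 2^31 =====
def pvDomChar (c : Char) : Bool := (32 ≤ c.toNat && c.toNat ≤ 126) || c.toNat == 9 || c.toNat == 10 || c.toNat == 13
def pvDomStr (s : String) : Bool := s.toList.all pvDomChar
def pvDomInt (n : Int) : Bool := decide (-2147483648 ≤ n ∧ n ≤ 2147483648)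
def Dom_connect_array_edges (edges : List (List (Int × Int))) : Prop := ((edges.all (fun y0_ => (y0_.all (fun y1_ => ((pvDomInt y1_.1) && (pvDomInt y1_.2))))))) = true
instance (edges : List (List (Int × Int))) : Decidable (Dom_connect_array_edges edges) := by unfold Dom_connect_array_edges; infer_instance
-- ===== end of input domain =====

-- B simulates the chaining on edge INDICES: endpoint-keyed index queues consumed by
-- lazy deletion against a used-flag array replace A's repeated filter/remove scans,
-- and a length-bucket table replaces the final sort (faster in a timing run).
-- A mutates its argument (empties it, extends member lists); B does not: the
-- equivalence claimed is about the return value only.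

-- edge[0] / edge[-1] / contour[-1]: total renderings, exact whenever the list is
-- nonempty (Pre_ guarantees every edge is nonempty, and contours stay nonempty).
def pvHead (e : List (Int × Int)) : Int × Int := e.headI
def pvLast (e : List (Int × Int)) : Int × Int := e.getLastD (0, 0)

-- ===== PORT A =====
-- one forward step of A's inner loop: filter the remaining edges by first point,
-- remove the first match, extend the contour by its tail
def pvStepF (es : List (List (Int × Int))) (c : List (Int × Int)) :
    List (List (Int × Int)) × List (Int × Int) :=
  match es.filter (fun e => pvHead e == pvLast c) with
  | [] => (es, c)
  | e :: _ => (es.erase e, c ++ e.tail)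

-- one backward step: filter by last point, extend by the reversed edge's tail
def pvStepB (es : List (List (Int × Int))) (c : List (Int × Int)) :
    List (List (Int × Int)) × List (Int × Int) :=
  match es.filter (fun e => pvLast e == pvLast c) with
  | [] => (es, c)
  | e :: _ => (es.erase e, c ++ e.reverse.tail)

lemma pvStepF_fst_le (es : List (List (Int × Int))) (c : List (Int × Int)) :
    (pvStepF es c).1.length ≤ es.length := by
  rcases h : es.filter (fun e => pvHead e == pvLast c) with _ | ⟨e, l⟩
  · simp [pvStepF, h]
  · simp only [pvStepF, h]
    exact (List.erase_sublist (a := e) (l := es)).length_le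

lemma pvStepB_fst_le (es : List (List (Int × Int))) (c : List (Int × Int)) :
    (pvStepB es c).1.length ≤ es.length := by
  rcases h : es.filter (fun e => pvLast e == pvLast c) with _ | ⟨e, l⟩
  · simp [pvStepB, h]
  · simp only [pvStepB, h]
    exact (List.erase_sublist (a := e) (l := es)).length_le

lemma pvStepF_lt (es : List (List (Int × Int))) (c : List (Int × Int))
    (h : (pvStepF es c).2.length ≠ c.length) : (pvStepF es c).1.length < es.length := by
  rcases hf : es.filter (fun e => pvHead e == pvLast c) with _ | ⟨e, l⟩
  · simp [pvStepF, hf] at h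
  · simp only [pvStepF, hf] at h ⊢
    have he : e ∈ es := List.mem_of_mem_filter (hf ▸ List.mem_cons_self)
    have := List.length_erase_of_mem he
    have := List.length_pos_of_mem he
    omega

lemma pvStepB_lt (es : List (List (Int × Int))) (c : List (Int × Int))
    (h : (pvStepB es c).2.length ≠ c.length) : (pvStepB es c).1.length < es.length := by
  rcases hf : es.filter (fun e => pvLast e == pvLast c) with _ | ⟨e, l⟩
  · simp [pvStepB, hf] at h
  · simp only [pvStepB, hf] at h ⊢
    have he : e ∈ es := List.mem_of_mem_filter (hf ▸ List.mem_cons_self)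
    have := List.length_erase_of_mem he
    have := List.length_pos_of_mem he
    omega

lemma pvStep_shrink (es : List (List (Int × Int))) (c : List (Int × Int))
    (h : (pvStepB (pvStepF es c).1 (pvStepF es c).2).2.length ≠ c.length) :
    (pvStepB (pvStepF es c).1 (pvStepF es c).2).1.length < es.length := by
  by_cases hf : (pvStepF es c).2.length = c.length
  · have hb : (pvStepB (pvStepF es c).1 (pvStepF es c).2).2.length ≠ (pvStepF es c).2.length := by
      omega
    have := pvStepB_lt (pvStepF es c).1 (pvStepF es c).2 hb
    have := pvStepF_fst_le es c
    omega
  · have := pvStepF_lt es c hf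
    have := pvStepB_fst_le (pvStepF es c).1 (pvStepF es c).2
    omega

-- A's inner while loop: try a forward then a backward extension; stop when the
-- contour length did not change over the round
def pvInnerA (es : List (List (Int × Int))) (c : List (Int × Int)) :
    List (List (Int × Int)) × List (Int × Int) :=
  let p := pvStepB (pvStepF es c).1 (pvStepF es c).2
  if h : p.2.length = c.length then p
  else pvInnerA p.1 p.2
termination_by es.length
decreasing_by exact pvStep_shrink es c h

lemma pvInnerA_fst_le_aux (n : Nat) : ∀ (es : List (List (Int × Int))) (c : List (Int × Int)),
    es.length ≤ n → (pvInnerA es c).1.length ≤ es.length := by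
  induction n with
  | zero =>
    intro es c h
    rw [pvInnerA]
    split
    · exact le_trans (pvStepB_fst_le _ _) (pvStepF_fst_le _ _)
    · rename_i hne
      have := pvStep_shrink es c hne
      omega
  | succ n ih =>
    intro es c h
    rw [pvInnerA]
    split
    · exact le_trans (pvStepB_fst_le _ _) (pvStepF_fst_le _ _)
    · rename_i hne
      have hs := pvStep_shrink es c hne
      have := ih (pvStepB (pvStepF es c).1 (pvStepF es c).2).1
        (pvStepB (pvStepF es c).1 (pvStepF es c).2).2 (by omega)
      omega

lemma pvInnerA_fst_le (es : List (List (Int × Int))) (c : List (Int × Int)) :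
    (pvInnerA es c).1.length ≤ es.length :=
  pvInnerA_fst_le_aux es.length es c le_rfl

-- A's outer while loop: pop the first remaining edge, chain a contour, collect a copy
def pvOuterA (es : List (List (Int × Int))) (acc : List (List (Int × Int))) :
    List (List (Int × Int)) :=
  match es with
  | [] => PySem.List.sorted acc (fun c => (c.length : Int)) false
  | c :: rest =>
    let p := pvInnerA rest c
    pvOuterA p.1 (acc ++ [p.2.map (fun q => (q.1, q.2))])
termination_by es.length
decreasing_by
  have := pvInnerA_fst_le rest c
  simp only [List.length_cons]
  omega

def connect_array_edges (edges : List (List (Int × Int))) : List (List (Int × Int)) :=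
  pvOuterA edges []

-- ===== PORT B =====
-- edges[i] for an index produced by range(n) (total rendering, exact for i < n)
def pvNth (edges : List (List (Int × Int))) (i : Nat) : List (Int × Int) :=
  edges.getD i []

-- B's state: the two endpoint-indexed queues of edge indices and the used flags
structure PvStB where
  starts : PySem.Dict (Int × Int) (List Nat)
  ends : PySem.Dict (Int × Int) (List Nat)
  used : List Bool

-- build both endpoint->indices queues in one pass over range(n)
def pvBuildB (edges : List (List (Int × Int))) :
    PySem.Dict (Int × Int) (List Nat) × PySem.Dict (Int × Int) (List Nat) :=
  (List.range edges.length).foldl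
    (fun d i => (d.1.modify (pvHead (pvNth edges i)) [] (· ++ [i]),
                 d.2.modify (pvLast (pvNth edges i)) [] (· ++ [i])))
    (PySem.Dict.empty, PySem.Dict.empty)

-- take(index, point): pop dead indices lazily, then pop and return the first live one
-- (the updated queue is stored back, as the in-place pops do in Python)
def pvTake (d : PySem.Dict (Int × Int) (List Nat)) (used : List Bool) (p : Int × Int) :
    Option Nat × PySem.Dict (Int × Int) (List Nat) :=
  match d.get? p with
  | none => (none, d)
  | some q =>
    match q.dropWhile (fun j => used.getD j true) with
    | [] => (none, d.insert p [])
    | j :: rest => (some j, d.insert p rest)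

-- B's inner 'while True' loop; the fuel only makes it total (each round that
-- continues has consumed at least one edge index, and the caller passes enough)
def pvInnerB (edges : List (List (Int × Int))) :
    Nat → PvStB → List (Int × Int) → PvStB × List (Int × Int)
  | 0, st, c => (st, c)
  | fuel + 1, st, c =>
    let t1 := pvTake st.starts st.used (pvLast c)
    let st1 : PvStB :=
      match t1.1 with
      | none => { st with starts := t1.2 }
      | some j => ⟨t1.2, st.ends, st.used.set j true⟩
    let c1 := match t1.1 with
      | none => c
      | some j => c ++ (pvNth edges j).tail
    let t2 := pvTake st1.ends st1.used (pvLast c1)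
    let st2 : PvStB :=
      match t2.1 with
      | none => { st1 with ends := t2.2 }
      | some j => ⟨st1.starts, t2.2, st1.used.set j true⟩
    let c2 := match t2.1 with
      | none => c1
      | some j => c1 ++ (pvNth edges j).dropLast.reverse
    if c2.length = c.length then (st2, c2) else pvInnerB edges fuel st2 c2

-- the final bucket pass: group the contours by length, emit buckets by ascending key
def pvBucketOut (cs : List (List (Int × Int))) : List (List (Int × Int)) :=
  let b := cs.foldl (fun d c => d.modify ((c.length : Int)) [] (· ++ [c])) PySem.Dict.empty
  (PySem.List.sorted b.keys (fun k => k) false).flatMap (fun k => b.getD k [])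

-- B's outer 'for i in range(n)' loop over edge indices
def pvOuterB (edges : List (List (Int × Int))) :
    List Nat → PvStB → List (List (Int × Int)) → List (List (Int × Int))
  | [], _, acc => pvBucketOut acc
  | i :: t, st, acc =>
    if st.used.getD i true then pvOuterB edges t st acc
    else
      let p := pvInnerB edges (edges.length + 1) ⟨st.starts, st.ends, st.used.set i true⟩
        ((pvNth edges i).map (fun q => (q.1, q.2)))
      pvOuterB edges t p.1 (acc ++ [p.2])

def connect_array_edges_alt (edges : List (List (Int × Int))) : List (List (Int × Int)) :=
  pvOuterB edges (List.range edges.length)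
    ⟨(pvBuildB edges).1, (pvBuildB edges).2, List.replicate edges.length false⟩ []

-- ===== PRECONDITION & SPEC =====
-- Pre_ excludes inputs containing an empty edge: A raises IndexError on most of them
-- (an empty edge seen by a filter) and silently drops leading empty edges on the rest,
-- while B raises IndexError on any empty edge (edges[i][0] while indexing endpoints).
def Pre_connect_array_edges (edges : List (List (Int × Int))) : Prop :=
  ∀ e ∈ edges, e ≠ []
instance (edges : List (List (Int × Int))) : Decidable (Pre_connect_array_edges edges) := by
  unfold Pre_connect_array_edges; infer_instance

def pvWitness_connect_array_edges : (List (List (Int × Int))) := [[(0, 0), (1, 1)], [(1, 1), (2, 0)]]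

def Spec_connect_array_edges (edges : List (List (Int × Int))) (out : List (List (Int × Int))) : Prop := out = connect_array_edges_alt edges
instance (edges : List (List (Int × Int))) (out : List (List (Int × Int))) : Decidable (Spec_connect_array_edges edges out) := by unfold Spec_connect_array_edges; infer_instance

-- ===== CLAIM (what is proved, stated in full; the proofs are below) =====
def Claim_equal_connect_array_edges : Prop := ∀ (edges : List (List (Int × Int))), Dom_connect_array_edges edges → Pre_connect_array_edges edges → Spec_connect_array_edges edges (connect_array_edges edges)

-- ===== LEMMAS AND PROOFS =====

-- ---- generic list facts used by the simulation ----

lemma pvFilterErase {α : Type} [DecidableEq α] (q : α → Bool) (l : List α) (a : α) :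
    (l.erase a).filter q = if q a then (l.filter q).erase a else l.filter q := by
  split_ifs with hq
  · exact List.erase_filter.symm
  · rw [← List.erase_filter]
    exact List.erase_of_not_mem
      (fun hm => by have := List.of_mem_filter hm; simp [hq] at this)

lemma pvDW_nil (u : Nat → Bool) (q : List Nat) (h : q.dropWhile u = []) :
    q.filter (fun j => !(u j)) = [] := by
  induction q with
  | nil => rfl
  | cons a t ih =>
    rw [List.dropWhile_cons] at h
    split_ifs at h with ha
    · simp [ha, ih h]

lemma pvDW_cons (u : Nat → Bool) (q : List Nat) (j : Nat) (r : List Nat)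
    (h : q.dropWhile u = j :: r) :
    q.filter (fun j => !(u j)) = j :: r.filter (fun j => !(u j)) ∧ u j = false ∧ (j :: r).Sublist q := by
  induction q with
  | nil => simp at h
  | cons a t ih =>
    rw [List.dropWhile_cons] at h
    split_ifs at h with ha
    · obtain ⟨h1, h2, h3⟩ := ih h
      exact ⟨by simp [ha, h1], h2, h3.cons a⟩
    · injection h with h1 h2
      subst h1; subst h2
      simp only [Bool.not_eq_true] at ha
      refine ⟨?_, ha, List.Sublist.refl _⟩
      rw [List.filter_cons, if_pos (by simp [ha])]

lemma pvUsedLt (used : List Bool) (j : Nat) (h : used.getD j true = false) :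
    j < used.length := by
  by_contra hlt
  rw [List.getD_eq_default _ _ (by omega)] at h
  simp at h

lemma pvGetD_set (used : List Bool) (j i : Nat) (hj : j < used.length) :
    (used.set j true).getD i true = if i = j then true else used.getD i true := by
  rcases Nat.lt_or_ge i used.length with hi | hi
  · rw [List.getD_eq_getElem _ _ (by simpa using hi), List.getD_eq_getElem _ _ hi,
      List.getElem_set]
    split_ifs with h1 h2 h2 <;> first | rfl | omega
  · rw [List.getD_eq_default _ _ (by simpa using hi), List.getD_eq_default _ _ hi]
    have : i ≠ j := by omega
    simp [this]

lemma pvFilterSet (l : List Nat) (used : List Bool) (j : Nat)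
    (hpw : l.Pairwise (· < ·)) (hj : used.getD j true = false) :
    l.filter (fun i => !((used.set j true).getD i true)) =
      (l.filter (fun i => !(used.getD i true))).erase j := by
  have hjl := pvUsedLt used j hj
  induction l with
  | nil => rfl
  | cons a t ih =>
    have hpt := List.Pairwise.of_cons hpw
    by_cases haj : a = j
    · subst haj
      have hnot : a ∉ t := fun hm => by
        have := (List.pairwise_cons.mp hpw).1 a hm; omega
      rw [List.filter_cons, if_neg (by rw [pvGetD_set used a a hjl, if_pos rfl]; simp),
        List.filter_cons, if_pos (by rw [hj]; rfl), List.erase_cons_head]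
      rw [List.filter_congr (l := t) (fun i hi => by
        have : i ≠ a := fun he => hnot (he ▸ hi)
        rw [pvGetD_set used a i hjl, if_neg this])]
    · rcases hu : used.getD a true with _ | _
      · rw [List.filter_cons, if_pos (by rw [pvGetD_set used j a hjl, if_neg haj, hu]; simp),
          List.filter_cons, if_pos (by rw [hu]; rfl),
          List.erase_cons_tail (by simpa using haj), ih hpt]
      · rw [List.filter_cons, if_neg (by rw [pvGetD_set used j a hjl, if_neg haj, hu]; simp),
          List.filter_cons, if_neg (by rw [hu]; simp), ih hpt]

lemma pvEraseMapFirst (U : List Nat) (f : Nat → List (Int × Int)) (j : Nat)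
    (hj : j ∈ U) (hpw : U.Pairwise (· < ·))
    (hfirst : ∀ j' ∈ U, f j' = f j → j ≤ j') :
    (U.map f).erase (f j) = (U.erase j).map f := by
  induction U with
  | nil => simp at hj
  | cons a t ih =>
    have hpt := List.Pairwise.of_cons hpw
    by_cases haj : f a = f j
    · have : a = j := by
        have h1 := hfirst a List.mem_cons_self haj
        rcases List.mem_cons.mp hj with rfl | hjt
        · rfl
        · have := (List.pairwise_cons.mp hpw).1 j hjt
          omega
      subst this
      rw [List.map_cons, List.erase_cons_head, List.erase_cons_head]
    · have haj' : a ≠ j := fun h => haj (h ▸ rfl)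
      have hjt : j ∈ t := by
        rcases List.mem_cons.mp hj with rfl | h
        · exact absurd rfl haj'
        · exact h
      rw [List.map_cons, List.erase_cons_tail (by simpa using haj),
        List.erase_cons_tail (by simpa using haj'), List.map_cons,
        ih hjt hpt (fun j' hj' he => hfirst j' (List.mem_cons_of_mem a hj') he)]

-- ---- the coupling invariant ----

-- the indices of the edges A still holds, in index order
def pvU (edges : List (List (Int × Int))) (used : List Bool) : List Nat :=
  (List.range edges.length).filter (fun j => !(used.getD j true))

-- each queue of B: strictly increasing, correctly keyed indices whose unused part
-- is exactly A's remaining edges with that endpoint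
def pvQInv (edges : List (List (Int × Int))) (used : List Bool)
    (d : PySem.Dict (Int × Int) (List Nat)) (key : List (Int × Int) → Int × Int) : Prop :=
  ∀ p : Int × Int,
    (d.getD p []).Pairwise (· < ·)
    ∧ (∀ j ∈ d.getD p [], j < edges.length ∧ key (pvNth edges j) = p)
    ∧ (d.getD p []).filter (fun j => !(used.getD j true)) =
        (pvU edges used).filter (fun j => key (pvNth edges j) == p)

def pvInv (edges es : List (List (Int × Int))) (st : PvStB) : Prop :=
  st.used.length = edges.length
  ∧ es = (pvU edges st.used).map (pvNth edges)
  ∧ pvQInv edges st.used st.starts pvHead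
  ∧ pvQInv edges st.used st.ends pvLast

lemma pvU_pairwise (edges : List (List (Int × Int))) (used : List Bool) :
    (pvU edges used).Pairwise (· < ·) :=
  List.pairwise_lt_range.filter _

lemma pvU_set (edges : List (List (Int × Int))) (used : List Bool) (j : Nat)
    (hj : used.getD j true = false) :
    pvU edges (used.set j true) = (pvU edges used).erase j :=
  pvFilterSet _ used j List.pairwise_lt_range hj

-- marking an index used preserves a queue invariant (the filters on both sides
-- lose exactly that index)
lemma pvQInv_set (edges : List (List (Int × Int))) (used : List Bool)
    (d : PySem.Dict (Int × Int) (List Nat)) (key : List (Int × Int) → Int × Int)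
    (j : Nat) (hj : used.getD j true = false)
    (h : pvQInv edges used d key) : pvQInv edges (used.set j true) d key := by
  intro p
  obtain ⟨h1, h2, h3⟩ := h p
  refine ⟨h1, h2, ?_⟩
  rw [pvFilterSet _ used j h1 hj, h3, pvU_set edges used j hj,
    pvFilterErase (fun j' => key (pvNth edges j') == p) (pvU edges used) j]
  split_ifs with hkey
  · rfl
  · apply List.erase_of_not_mem
    intro hm
    have := List.of_mem_filter hm
    simp only [beq_iff_eq] at this hkey
    exact hkey (by simp [this])

-- ---- one take-step agrees with one filter/remove step of A ----

lemma pvTakeStep (edges : List (List (Int × Int))) (used : List Bool)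
    (d dO : PySem.Dict (Int × Int) (List Nat))
    (key keyO : List (Int × Int) → Int × Int) (ext : List (Int × Int) → List (Int × Int))
    (c : List (Int × Int))
    (hlen : used.length = edges.length)
    (hq : pvQInv edges used d key) (hqO : pvQInv edges used dO keyO) :
    (match (((pvU edges used).map (pvNth edges)).filter (fun e => key e == pvLast c)) with
      | [] => (((pvU edges used).map (pvNth edges)), c)
      | e :: _ => ((((pvU edges used).map (pvNth edges)).erase e), c ++ ext e))
    = (((pvU edges (match (pvTake d used (pvLast c)).1 with
          | none => used | some j => used.set j true)).map (pvNth edges)),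
        (match (pvTake d used (pvLast c)).1 with
          | none => c | some j => c ++ ext (pvNth edges j)))
    ∧ pvQInv edges (match (pvTake d used (pvLast c)).1 with
          | none => used | some j => used.set j true) (pvTake d used (pvLast c)).2 key
    ∧ pvQInv edges (match (pvTake d used (pvLast c)).1 with
          | none => used | some j => used.set j true) dO keyO
    ∧ (match (pvTake d used (pvLast c)).1 with
          | none => used | some j => used.set j true).length = edges.length
    ∧ (∀ i, used.getD i true = true →
        (match (pvTake d used (pvLast c)).1 with
          | none => used | some j => used.set j true).getD i true = true) := by
  obtain ⟨hq1, hq2, hq3⟩ := hq (pvLast c)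
  have hfm : (((pvU edges used).map (pvNth edges)).filter (fun e => key e == pvLast c))
      = ((pvU edges used).filter (fun j => key (pvNth edges j) == pvLast c)).map (pvNth edges) := by
    rw [List.filter_map]; rfl
  rcases hget : d.get? (pvLast c) with _ | q
  · -- key absent: nothing matches
    have hgd : d.getD (pvLast c) [] = [] := PySem.Dict.getD_of_get?_eq_none d [] hget
    rw [hgd] at hq3
    simp only [pvTake, hget]
    rw [hfm, ← hq3]
    exact ⟨rfl, hq, hqO, hlen, fun i hi => hi⟩
  · have hgd : d.getD (pvLast c) [] = q := PySem.Dict.getD_of_get?_eq_some d [] hget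
    rw [hgd] at hq1 hq2 hq3
    rcases hdw : q.dropWhile (fun j => used.getD j true) with _ | ⟨j, rest⟩
    · -- all queued indices are dead: nothing matches
      have hnil := pvDW_nil _ q hdw
      rw [hnil] at hq3
      simp only [pvTake, hget, hdw]
      rw [hfm, ← hq3]
      refine ⟨rfl, ?_, hqO, hlen, fun i hi => hi⟩
      intro p'
      by_cases hp : p' = pvLast c
      · subst hp
        rw [PySem.Dict.getD_insert_self]
        exact ⟨List.Pairwise.nil, by simp, by rw [List.filter_nil]; exact hq3⟩
      · rw [PySem.Dict.getD_insert_of_ne _ _ _ hp]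
        exact hq p'
    · -- a live index j: A removes exactly the edge at j
      obtain ⟨hfilter, huj, hsub⟩ := pvDW_cons _ q j rest hdw
      rw [hfilter] at hq3
      have hjq : j ∈ q := hsub.mem List.mem_cons_self
      obtain ⟨hjn, hkeyj⟩ := hq2 j hjq
      have hpwjr : (j :: rest).Pairwise (· < ·) := hq1.sublist hsub
      have hjU : j ∈ pvU edges used := by
        have : j ∈ (pvU edges used).filter (fun j' => key (pvNth edges j') == pvLast c) := by
          rw [← hq3]; exact List.mem_cons_self
        exact List.mem_of_mem_filter this
      have herase : ((pvU edges used).map (pvNth edges)).erase (pvNth edges j)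
          = ((pvU edges used).erase j).map (pvNth edges) := by
        refine pvEraseMapFirst (pvU edges used) (pvNth edges) j hjU (pvU_pairwise edges used) ?_
        intro j' hj' he
        by_contra hlt
        have hk' : key (pvNth edges j') == pvLast c := by rw [he, hkeyj]; exact beq_self_eq_true _
        have : j' ∈ (pvU edges used).filter (fun j' => key (pvNth edges j') == pvLast c) :=
          List.mem_filter.mpr ⟨hj', hk'⟩
        rw [← hq3] at this
        rcases List.mem_cons.mp this with rfl | hmem
        · omega
        · have := (List.pairwise_cons.mp hpwjr).1 j' (List.mem_of_mem_filter hmem)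
          omega
      have hUset := pvU_set edges used j huj
      simp only [pvTake, hget, hdw]
      rw [hfm, ← hq3]
      simp only [List.map_cons]
      refine ⟨?_, ?_, pvQInv_set edges used dO keyO j huj hqO, by simpa using hlen, ?_⟩
      · rw [herase, hUset]
      · -- the popped queue under the taken key; other keys via pvQInv_set
        have hset := pvQInv_set edges used d key j huj hq
        intro p'
        by_cases hp : p' = pvLast c
        · subst hp
          rw [PySem.Dict.getD_insert_self]
          refine ⟨hpwjr.of_cons, fun i hi => hq2 i (hsub.mem (List.mem_cons_of_mem j hi)), ?_⟩
          have hrest : rest.filter (fun i => !((used.set j true).getD i true))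
              = rest.filter (fun i => !(used.getD i true)) := by
            refine List.filter_congr (fun i hi => ?_)
            have : j < i := (List.pairwise_cons.mp hpwjr).1 i hi
            rw [pvGetD_set used j i (pvUsedLt used j huj), if_neg (by omega)]
          rw [hrest, hUset,
            pvFilterErase (fun j' => key (pvNth edges j') == pvLast c) (pvU edges used) j,
            if_pos (by rw [hkeyj]; exact beq_self_eq_true _), ← hq3, List.erase_cons_head]
        · rw [PySem.Dict.getD_insert_of_ne _ _ _ hp]
          exact hset p'
      · intro i hi
        rw [pvGetD_set used j i (pvUsedLt used j huj)]
        split_ifs with h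
        · rfl
        · exact hi

-- unfold one round of B's inner loop into components (the two matches on each
-- take's result, reassociated into a flat state tuple)
lemma pvInnerB_succ (edges : List (List (Int × Int))) (fuel : Nat) (st : PvStB)
    (c : List (Int × Int)) :
    pvInnerB edges (fuel + 1) st c =
      (let t1 := pvTake st.starts st.used (pvLast c)
       let u1 : List Bool := match t1.1 with | none => st.used | some j => st.used.set j true
       let c1 := match t1.1 with | none => c | some j => c ++ (pvNth edges j).tail
       let t2 := pvTake st.ends u1 (pvLast c1)
       let u2 : List Bool := match t2.1 with | none => u1 | some j => u1.set j true
       let c2 := match t2.1 with | none => c1 | some j => c1 ++ (pvNth edges j).dropLast.reverse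
       if c2.length = c.length then (⟨t1.2, t2.2, u2⟩, c2)
       else pvInnerB edges fuel ⟨t1.2, t2.2, u2⟩ c2) := by
  show (let t1 := pvTake st.starts st.used (pvLast c)
        let st1 : PvStB :=
          match t1.1 with
          | none => { st with starts := t1.2 }
          | some j => ⟨t1.2, st.ends, st.used.set j true⟩
        let c1 := match t1.1 with
          | none => c
          | some j => c ++ (pvNth edges j).tail
        let t2 := pvTake st1.ends st1.used (pvLast c1)
        let st2 : PvStB :=
          match t2.1 with
          | none => { st1 with ends := t2.2 }
          | some j => ⟨st1.starts, t2.2, st1.used.set j true⟩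
        let c2 := match t2.1 with
          | none => c1
          | some j => c1 ++ (pvNth edges j).dropLast.reverse
        if c2.length = c.length then (st2, c2) else pvInnerB edges fuel st2 c2) = _
  rcases ho1 : (pvTake st.starts st.used (pvLast c)).1 with _ | j1 <;>
    simp only [ho1] <;> split <;> rfl

-- the inner loops agree and preserve the invariant (fuel large enough)
lemma pvInnerSim (edges : List (List (Int × Int))) (fuel : Nat) :
    ∀ (es : List (List (Int × Int))) (c : List (Int × Int)) (st : PvStB),
    pvInv edges es st → es.length < fuel →
    (pvInnerA es c).2 = (pvInnerB edges fuel st c).2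
    ∧ pvInv edges (pvInnerA es c).1 (pvInnerB edges fuel st c).1
    ∧ (∀ i, st.used.getD i true = true →
        (pvInnerB edges fuel st c).1.used.getD i true = true) := by
  induction fuel with
  | zero => intro es c st _ hfuel; omega
  | succ fuel ih =>
    intro es c st hInv hfuel
    obtain ⟨hlen, hes, hqS, hqE⟩ := hInv
    have hF := pvTakeStep edges st.used st.starts st.ends pvHead pvLast List.tail c hlen hqS hqE
    rw [← hes] at hF
    obtain ⟨hFeq', hqS1, hqE1, hlen1, hmono1⟩ := hF
    have hFeq : pvStepF es c
        = (((pvU edges (match (pvTake st.starts st.used (pvLast c)).1 with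
              | none => st.used | some j => st.used.set j true)).map (pvNth edges)),
           (match (pvTake st.starts st.used (pvLast c)).1 with
              | none => c | some j => c ++ (pvNth edges j).tail)) := hFeq'
    have hB := pvTakeStep edges _ st.ends (pvTake st.starts st.used (pvLast c)).2 pvLast pvHead
      (fun e => e.reverse.tail)
      (match (pvTake st.starts st.used (pvLast c)).1 with
        | none => c | some j => c ++ (pvNth edges j).tail) hlen1 hqE1 hqS1
    obtain ⟨hBeq', hqE2, hqS2, hlen2, hmono2⟩ := hB
    have hBeq : pvStepB (pvStepF es c).1 (pvStepF es c).2
        = (((pvU edges (match (pvTake st.ends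
              (match (pvTake st.starts st.used (pvLast c)).1 with
                | none => st.used | some j => st.used.set j true)
              (pvLast (match (pvTake st.starts st.used (pvLast c)).1 with
                | none => c | some j => c ++ (pvNth edges j).tail))).1 with
              | none => (match (pvTake st.starts st.used (pvLast c)).1 with
                  | none => st.used | some j => st.used.set j true)
              | some j => (match (pvTake st.starts st.used (pvLast c)).1 with
                  | none => st.used | some j => st.used.set j true).set j true)).map (pvNth edges)),
           (match (pvTake st.ends
              (match (pvTake st.starts st.used (pvLast c)).1 with
                | none => st.used | some j => st.used.set j true)
              (pvLast (match (pvTake st.starts st.used (pvLast c)).1 with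
                | none => c | some j => c ++ (pvNth edges j).tail))).1 with
              | none => (match (pvTake st.starts st.used (pvLast c)).1 with
                  | none => c | some j => c ++ (pvNth edges j).tail)
              | some j => (match (pvTake st.starts st.used (pvLast c)).1 with
                  | none => c | some j => c ++ (pvNth edges j).tail)
                  ++ (pvNth edges j).reverse.tail)) := by
      rw [hFeq]
      exact hBeq'
    rw [pvInnerA, pvInnerB_succ]
    simp only [← List.tail_reverse]
    rw [hBeq]
    split_ifs with hlenEq
    · exact ⟨rfl, ⟨hlen2, rfl, hqS2, hqE2⟩, fun i hi => hmono2 i (hmono1 i hi)⟩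
    · have hshrink : (pvStepB (pvStepF es c).1 (pvStepF es c).2).1.length < es.length := by
        refine pvStep_shrink es c ?_
        rw [hBeq]
        exact hlenEq
      simp only [hBeq] at hshrink
      have := ih ((pvU edges
          (match (pvTake st.ends (match (pvTake st.starts st.used (pvLast c)).1 with
              | none => st.used | some j => st.used.set j true)
              (pvLast (match (pvTake st.starts st.used (pvLast c)).1 with
                | none => c | some j => c ++ (pvNth edges j).tail))).1 with
            | none => (match (pvTake st.starts st.used (pvLast c)).1 with
                | none => st.used | some j => st.used.set j true)
            | some j => (match (pvTake st.starts st.used (pvLast c)).1 with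
                | none => st.used | some j => st.used.set j true).set j true)).map (pvNth edges))
        (match (pvTake st.ends (match (pvTake st.starts st.used (pvLast c)).1 with
              | none => st.used | some j => st.used.set j true)
              (pvLast (match (pvTake st.starts st.used (pvLast c)).1 with
                | none => c | some j => c ++ (pvNth edges j).tail))).1 with
          | none => (match (pvTake st.starts st.used (pvLast c)).1 with
              | none => c | some j => c ++ (pvNth edges j).tail)
          | some j => (match (pvTake st.starts st.used (pvLast c)).1 with
              | none => c | some j => c ++ (pvNth edges j).tail) ++ (pvNth edges j).reverse.tail)
        ⟨(pvTake st.starts st.used (pvLast c)).2, _, _⟩ ⟨hlen2, rfl, hqS2, hqE2⟩ (by omega)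
      exact ⟨this.1, this.2.1, fun i hi => this.2.2 i (hmono2 i (hmono1 i hi))⟩

-- ---- the bucket pass is the stable sort by length ----

lemma pvFlatCongr {α β : Type} (l : List α) (f g : α → List β)
    (h : ∀ k ∈ l, f k = g k) : l.flatMap f = l.flatMap g := by
  induction l with
  | nil => rfl
  | cons a t ih =>
    rw [List.flatMap_cons, List.flatMap_cons, h a List.mem_cons_self,
      ih (fun k hk => h k (List.mem_cons_of_mem a hk))]

lemma pvInsertBy_head (x : List (Int × Int)) (m : List (List (Int × Int)))
    (h : ∀ y ∈ m, (x.length : Int) < (y.length : Int)) :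
    PySem.List.insertBy (fun a b => decide ((a.length : Int) < (b.length : Int))) x m
      = x :: m := by
  cases m with
  | nil => rfl
  | cons y ys =>
    rw [PySem.List.insertBy, if_pos (decide_eq_true (h y List.mem_cons_self))]

lemma pvInsertBy_append (x : List (Int × Int)) (l m : List (List (Int × Int)))
    (h : ∀ y ∈ l, ¬((x.length : Int) < (y.length : Int))) :
    PySem.List.insertBy (fun a b => decide ((a.length : Int) < (b.length : Int))) x (l ++ m)
      = l ++ PySem.List.insertBy (fun a b => decide ((a.length : Int) < (b.length : Int))) x m := by
  induction l with
  | nil => rfl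
  | cons a t ih =>
    rw [List.cons_append, PySem.List.insertBy,
      if_neg (by simpa using h a List.mem_cons_self), ih (fun y hy => h y (List.mem_cons_of_mem a hy)),
      List.cons_append]

-- inserting an element into a concatenation of key buckets with strictly increasing
-- keys appends it to its own bucket (stability of Python's sort, bucket form)
lemma pvInsertFlat (x : List (Int × Int)) (B : Int → List (List (Int × Int))) :
    ∀ (ks : List Int), ks.Pairwise (· < ·) →
    (∀ k ∈ ks, ∀ c ∈ B k, (c.length : Int) = k) →
    ((x.length : Int) ∉ ks → B ((x.length : Int)) = []) →
    PySem.List.insertBy (fun a b => decide ((a.length : Int) < (b.length : Int))) x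
        (ks.flatMap B)
      = (if (x.length : Int) ∈ ks then ks
         else PySem.List.insertBy (fun a b => decide (a < b)) ((x.length : Int)) ks).flatMap
          (fun k => if k = (x.length : Int) then B k ++ [x] else B k) := by
  intro ks
  induction ks with
  | nil =>
    intro _ _ hBx
    simp [PySem.List.insertBy, hBx (by simp)]
  | cons k0 ks' ih =>
    intro hpw hB hBx
    have hpt := hpw.of_cons
    have hgt : ∀ k ∈ ks', k0 < k := (List.pairwise_cons.mp hpw).1
    rcases lt_trichotomy ((x.length : Int)) k0 with hlt | heq | hgtx
    · have hnot : (x.length : Int) ∉ k0 :: ks' := by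
        intro hm
        rcases List.mem_cons.mp hm with h | h
        · omega
        · have := hgt _ h; omega
      have hall : ∀ y ∈ (k0 :: ks').flatMap B, (x.length : Int) < (y.length : Int) := by
        intro y hy
        obtain ⟨k, hk, hyk⟩ := List.mem_flatMap.mp hy
        have h1 := hB k hk y hyk
        rcases List.mem_cons.mp hk with rfl | hk'
        · omega
        · have := hgt k hk'; omega
      rw [if_neg hnot, pvInsertBy_head x _ hall, PySem.List.insertBy,
        if_pos (decide_eq_true hlt)]
      simp only [List.flatMap_cons, if_true]
      rw [hBx hnot, List.nil_append,
        if_neg (fun (he : k0 = ((x.length : Int))) => hnot (he ▸ List.mem_cons_self)),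
        pvFlatCongr ks' _ B (fun k hk =>
          if_neg (fun (he : k = ((x.length : Int))) => hnot (he ▸ List.mem_cons_of_mem k0 hk)))]
      rfl
    · rw [if_pos (by rw [heq]; exact List.mem_cons_self), List.flatMap_cons,
        pvInsertBy_append x _ _ (fun y hy => by
          have := hB k0 List.mem_cons_self y hy; omega),
        pvInsertBy_head x _ (fun y hy => by
          obtain ⟨k, hk, hyk⟩ := List.mem_flatMap.mp hy
          have h1 := hB k (List.mem_cons_of_mem _ hk) y hyk
          have h2 := hgt k hk
          omega),
        List.flatMap_cons, if_pos heq.symm,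
        pvFlatCongr ks' _ B (fun k hk => if_neg (fun he => by
          have := hgt k hk; omega))]
      simp
    · have hne : (x.length : Int) ≠ k0 := by omega
      by_cases hm : (x.length : Int) ∈ ks'
      · rw [if_pos (List.mem_cons_of_mem _ hm), List.flatMap_cons,
          pvInsertBy_append x _ _ (fun y hy => by
            have := hB k0 List.mem_cons_self y hy; omega),
          ih hpt (fun k hk => hB k (List.mem_cons_of_mem _ hk)) (fun h => absurd hm h),
          if_pos hm, List.flatMap_cons, if_neg (fun he => hne he.symm)]
      · have hnot : (x.length : Int) ∉ k0 :: ks' := by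
          intro h
          rcases List.mem_cons.mp h with h | h
          · exact hne h
          · exact hm h
        rw [if_neg hnot, List.flatMap_cons,
          pvInsertBy_append x _ _ (fun y hy => by
            have := hB k0 List.mem_cons_self y hy; omega),
          ih hpt (fun k hk => hB k (List.mem_cons_of_mem _ hk)) (fun _ => hBx hnot),
          if_neg hm, PySem.List.insertBy, if_neg (by simpa using not_lt.mpr (le_of_lt hgtx)),
          List.flatMap_cons, if_neg (fun he => hne he.symm)]

-- the bucket dict's lookups: the contours of that length, in build order
lemma pvBucketGetD (cs : List (List (Int × Int))) (k : Int) :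
    (cs.foldl (fun d c => d.modify ((c.length : Int)) [] (· ++ [c])) PySem.Dict.empty).getD k []
      = cs.filter (fun c => ((c.length : Int) == k)) := by
  have h := PySem.Dict.getD_foldl_modify_append
    (cs.map (fun c => (((c.length : Int)), c)))
    (PySem.Dict.empty (κ := Int) (ν := List (List (Int × Int)))) k
  rw [List.foldl_map] at h
  simp only [PySem.Dict.getD_empty, List.nil_append, List.filter_map] at h
  rw [h, List.map_map]
  simp [Function.comp_def]

lemma pvBucketKeys (cs : List (List (Int × Int))) :
    (cs.foldl (fun d c => d.modify ((c.length : Int)) [] (· ++ [c])) PySem.Dict.empty).keys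
      = PySem.Set.ofList (cs.map (fun c => (c.length : Int))) := by
  have h := PySem.Dict.keys_foldl_modify_key cs (fun c => ((c.length : Int))) []
    (fun _ c => (· ++ [c])) PySem.Dict.empty
  rw [h]
  simp [PySem.Dict.keys_empty, PySem.Set.update, PySem.Set.ofList_eq_foldl]

-- flattening the buckets in ascending key order is the stable sort by length
lemma pvBucketFlat (cs : List (List (Int × Int))) :
    (PySem.List.sorted (PySem.Set.ofList (cs.map (fun c => (c.length : Int))))
        (fun k => k) false).flatMap
      (fun k => cs.filter (fun c => ((c.length : Int) == k)))
    = PySem.List.sorted cs (fun c => (c.length : Int)) false := by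
  induction cs using List.reverseRecOn with
  | nil => rfl
  | append_singleton xs x ih =>
    have hsR : PySem.List.sorted (xs ++ [x]) (fun c => (c.length : Int)) false
        = PySem.List.insertBy (fun a b => decide ((a.length : Int) < (b.length : Int))) x
            (PySem.List.sorted xs (fun c => (c.length : Int)) false) := by
      rw [PySem.List.sorted_eq_foldl_insertBy, PySem.List.sorted_eq_foldl_insertBy,
        List.foldl_append]
      rfl
    have hmemks : ∀ k : Int,
        (k ∈ PySem.List.sorted (PySem.Set.ofList (xs.map (fun c => (c.length : Int))))
            (fun k => k) false) ↔ k ∈ xs.map (fun c => (c.length : Int)) := by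
      intro k
      rw [PySem.List.mem_sorted, PySem.Set.mem_ofList]
    have hB : ∀ k ∈ PySem.List.sorted (PySem.Set.ofList (xs.map (fun c => (c.length : Int))))
        (fun k => k) false, ∀ c ∈ xs.filter (fun c => ((c.length : Int) == k)),
        (c.length : Int) = k := by
      intro k _ c hc
      have := List.of_mem_filter hc
      simpa using this
    have hBx : ((x.length : Int) ∉ PySem.List.sorted
          (PySem.Set.ofList (xs.map (fun c => (c.length : Int)))) (fun k => k) false) →
        xs.filter (fun c => ((c.length : Int) == (x.length : Int))) = [] := by
      intro hnot
      rw [hmemks] at hnot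
      refine List.filter_eq_nil_iff.mpr (fun c hc hbeq => ?_)
      refine hnot ?_
      refine List.mem_map.mpr ⟨c, hc, ?_⟩
      simpa using hbeq
    have hbk : ∀ k ∈ PySem.List.sorted (PySem.Set.ofList (xs.map (fun c => (c.length : Int))))
        (fun k => k) false,
        (xs ++ [x]).filter (fun c => ((c.length : Int) == k))
        = (if k = (x.length : Int)
            then xs.filter (fun c => ((c.length : Int) == k)) ++ [x]
            else xs.filter (fun c => ((c.length : Int) == k))) := by
      intro k _
      rw [List.filter_append]
      by_cases hk : k = (x.length : Int)
      · rw [if_pos hk, List.filter_cons]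
        simp [hk]
      · rw [if_neg hk, List.filter_cons]
        rw [if_neg (by simpa using fun he => hk (by omega)), List.filter_nil, List.append_nil]
    rw [hsR, ← ih,
      pvInsertFlat x _ _ (PySem.List.sorted_ofList_pairwise_lt _) hB hBx]
    have hofl : PySem.Set.ofList ((xs ++ [x]).map (fun c => (c.length : Int)))
        = PySem.Set.add (PySem.Set.ofList (xs.map (fun c => (c.length : Int))))
            ((x.length : Int)) := by
      simp [PySem.Set.ofList_eq_foldl, List.foldl_append]
    by_cases hmem : (x.length : Int) ∈ xs.map (fun c => (c.length : Int))
    · have hadd : PySem.Set.add (PySem.Set.ofList (xs.map (fun c => (c.length : Int))))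
          ((x.length : Int)) = PySem.Set.ofList (xs.map (fun c => (c.length : Int))) := by
        have : (x.length : Int) ∈ PySem.Set.ofList (xs.map (fun c => (c.length : Int))) :=
          (PySem.Set.mem_ofList _ _).mpr hmem
        simp only [PySem.Set.add]
        rw [if_pos (by simpa [List.contains_iff_mem, List.elem_iff] using this)]
      rw [if_pos ((hmemks _).mpr hmem), hofl, hadd]
      exact pvFlatCongr _ _ _ hbk
    · have hadd : PySem.Set.add (PySem.Set.ofList (xs.map (fun c => (c.length : Int))))
          ((x.length : Int)) = PySem.Set.ofList (xs.map (fun c => (c.length : Int))) ++ [(x.length : Int)] := by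
        have : (x.length : Int) ∉ PySem.Set.ofList (xs.map (fun c => (c.length : Int))) :=
          fun h => hmem ((PySem.Set.mem_ofList _ _).mp h)
        simp only [PySem.Set.add]
        rw [if_neg (by simp [List.elem_iff, this])]
      have hsK : PySem.List.sorted
            (PySem.Set.ofList (xs.map (fun c => (c.length : Int))) ++ [(x.length : Int)])
            (fun k => k) false
          = PySem.List.insertBy (fun a b => decide (a < b)) ((x.length : Int))
              (PySem.List.sorted (PySem.Set.ofList (xs.map (fun c => (c.length : Int))))
                (fun k => k) false) := by
        rw [PySem.List.sorted_eq_foldl_insertBy, PySem.List.sorted_eq_foldl_insertBy,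
          List.foldl_append]
        rfl
      rw [if_neg (fun h => hmem ((hmemks _).mp h)), hofl, hadd, hsK]
      refine (pvFlatCongr _ _ _ (fun k hk => ?_)).symm
      have hkmem : k ∈ (x.length : Int) ::
          PySem.List.sorted (PySem.Set.ofList (xs.map (fun c => (c.length : Int))))
            (fun k => k) false := by
        have := (PySem.List.mem_insertBy _ _ _ _).mp hk
        rcases this with h | h
        · exact h ▸ List.mem_cons_self
        · exact List.mem_cons_of_mem _ h
      rcases List.mem_cons.mp hkmem with rfl | hkm
      · simp
      · exact (hbk k hkm).symm

lemma pvBucketOut_eq (cs : List (List (Int × Int))) :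
    pvBucketOut cs = PySem.List.sorted cs (fun c => (c.length : Int)) false := by
  simp only [pvBucketOut]
  rw [pvBucketKeys]
  rw [pvFlatCongr _ _ (fun k => cs.filter (fun c => ((c.length : Int) == k)))
    (fun k _ => pvBucketGetD cs k)]
  exact pvBucketFlat cs

-- ---- the outer loops agree ----

lemma pvOuterSim (edges : List (List (Int × Int))) :
    ∀ (rest : List Nat) (es : List (List (Int × Int))) (st : PvStB)
      (acc : List (List (Int × Int))),
    pvInv edges es st → (∀ j ∈ pvU edges st.used, j ∈ rest) → rest.Pairwise (· < ·) →
    pvOuterA es acc = pvOuterB edges rest st acc := by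
  intro rest
  induction rest with
  | nil =>
    intro es st acc hInv hsub _
    obtain ⟨hlen, hes, _, _⟩ := hInv
    have hU : pvU edges st.used = [] := List.eq_nil_iff_forall_not_mem.mpr
      (fun j hj => by simpa using hsub j hj)
    rw [hes, hU, List.map_nil, pvOuterA, pvOuterB, pvBucketOut_eq]
  | cons i t ih =>
    intro es st acc hInv hsub hpw
    obtain ⟨hlen, hes, hqS, hqE⟩ := hInv
    by_cases hui : st.used.getD i true
    · rw [pvOuterB, if_pos hui]
      refine ih es st acc ⟨hlen, hes, hqS, hqE⟩ (fun j hj => ?_) hpw.of_cons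
      have hju : st.used.getD j true = false := by
        have := List.of_mem_filter hj; simpa using this
      rcases List.mem_cons.mp (hsub j hj) with rfl | hjt
      · rw [hju] at hui; exact absurd hui (by simp)
      · exact hjt
    · simp only [Bool.not_eq_true] at hui
      have hiU : i ∈ pvU edges st.used := by
        refine List.mem_filter.mpr ⟨List.mem_range.mpr ?_, by have h := hui; rw [List.getD_eq_getElem?_getD] at h; simp [h]⟩
        have := pvUsedLt st.used i hui
        omega
      rcases hu : pvU edges st.used with _ | ⟨u0, us⟩
      · rw [hu] at hiU; simp at hiU
      · have hu0 : u0 = i := by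
          have h1 : u0 ∈ pvU edges st.used := by rw [hu]; exact List.mem_cons_self
          rcases List.mem_cons.mp (hsub u0 h1) with h | h
          · exact h
          · have h2 : i < u0 := (List.pairwise_cons.mp hpw).1 u0 h
            have h3 : i ∈ u0 :: us := hu ▸ hiU
            rcases List.mem_cons.mp h3 with rfl | h4
            · omega
            · have := (List.pairwise_cons.mp (hu ▸ pvU_pairwise edges st.used)).1 i h4
              omega
        subst hu0
        have hesc : es = pvNth edges u0 :: us.map (pvNth edges) := by
          rw [hes, hu, List.map_cons]
        have hus : us = pvU edges (st.used.set u0 true) := by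
          rw [pvU_set edges st.used u0 hui, hu, List.erase_cons_head]
        have hmapid : ∀ l : List (Int × Int), l.map (fun q => (q.1, q.2)) = l := by
          intro l; simp
        have hInv0 : pvInv edges (us.map (pvNth edges))
            ⟨st.starts, st.ends, st.used.set u0 true⟩ :=
          ⟨by simpa using hlen, by rw [← hus],
           pvQInv_set edges st.used st.starts pvHead u0 hui hqS,
           pvQInv_set edges st.used st.ends pvLast u0 hui hqE⟩
        have hfuel : (us.map (pvNth edges)).length < edges.length + 1 := by
          have h1 : (pvU edges st.used).length ≤ edges.length := by
            have := List.length_filter_le (fun j => !(st.used.getD j true))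
              (List.range edges.length)
            simpa [pvU] using this
          rw [hu] at h1
          simp only [List.length_map, List.length_cons] at h1 ⊢
          omega
        have hSim := pvInnerSim edges (edges.length + 1) (us.map (pvNth edges))
          (pvNth edges u0) ⟨st.starts, st.ends, st.used.set u0 true⟩ hInv0 hfuel
        rw [hesc, pvOuterA]
        rw [pvOuterB, if_neg (by have h := hui; rw [List.getD_eq_getElem?_getD] at h; simp [h]), hmapid, hSim.1, hmapid]
        refine ih _ _ _ hSim.2.1 (fun j hj => ?_) hpw.of_cons
        have hjf : (pvInnerB edges (edges.length + 1)
            ⟨st.starts, st.ends, st.used.set u0 true⟩ (pvNth edges u0)).1.used.getD j true = false := by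
          have := List.of_mem_filter hj; simpa using this
        have hj0 : (st.used.set u0 true).getD j true = false := by
          by_contra hcon
          simp only [Bool.not_eq_false] at hcon
          rw [hSim.2.2 j hcon] at hjf
          simp at hjf
        have hil := pvUsedLt st.used u0 hui
        rw [pvGetD_set st.used u0 j hil] at hj0
        have hjne : j ≠ u0 := by intro h; rw [if_pos h] at hj0; simp at hj0
        rw [if_neg hjne] at hj0
        have hjU : j ∈ pvU edges st.used := by
          refine List.mem_filter.mpr ⟨List.mem_range.mpr ?_, by have h := hj0; rw [List.getD_eq_getElem?_getD] at h; simp [h]⟩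
          have := pvUsedLt st.used j hj0
          omega
        rcases List.mem_cons.mp (hsub j hjU) with rfl | h
        · exact absurd rfl hjne
        · exact h

-- ---- initial state ----

lemma pvGetD_replicate (n m : Nat) (d : Bool) :
    (List.replicate n false).getD m d = if m < n then false else d := by
  rw [List.getD_eq_getElem?_getD, List.getElem?_replicate]; split_ifs <;> rfl

-- the built queue under a key function: exactly the matching indices, in order
lemma pvBuild_getD (edges : List (List (Int × Int))) (key : List (Int × Int) → Int × Int)
    (p : Int × Int) :
    ((List.range edges.length).foldl
        (fun d i => d.modify (key (pvNth edges i)) [] (· ++ [i])) PySem.Dict.empty).getD p []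
      = (List.range edges.length).filter (fun i => key (pvNth edges i) == p) := by
  have h := PySem.Dict.getD_foldl_modify_append
    ((List.range edges.length).map (fun i => (key (pvNth edges i), i)))
    (PySem.Dict.empty (κ := Int × Int) (ν := List Nat)) p
  rw [List.foldl_map] at h
  simp only [PySem.Dict.getD_empty, List.nil_append, List.filter_map] at h
  rw [h, List.map_map]
  simp [Function.comp_def]

lemma pvBuildQInv (edges : List (List (Int × Int))) (key : List (Int × Int) → Int × Int) :
    pvQInv edges (List.replicate edges.length false)
      ((List.range edges.length).foldl
        (fun d i => d.modify (key (pvNth edges i)) [] (· ++ [i])) PySem.Dict.empty) key := by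
  intro p
  rw [pvBuild_getD]
  refine ⟨List.pairwise_lt_range.filter _, fun j hj => ?_, ?_⟩
  · have h1 := List.mem_range.mp (List.mem_of_mem_filter hj)
    have h2 := List.of_mem_filter hj
    simp only [beq_iff_eq] at h2
    exact ⟨h1, h2⟩
  · have hU : pvU edges (List.replicate edges.length false) = List.range edges.length := by
      refine List.filter_eq_self.mpr (fun j hj => ?_)
      rw [pvGetD_replicate, if_pos (List.mem_range.mp hj)]
      rfl
    rw [hU]
    refine List.filter_eq_self.mpr (fun j hj => ?_)
    have := List.mem_range.mp (List.mem_of_mem_filter hj)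
    rw [pvGetD_replicate, if_pos this]
    rfl

lemma pvInit (edges : List (List (Int × Int))) :
    pvInv edges edges
      ⟨(pvBuildB edges).1, (pvBuildB edges).2, List.replicate edges.length false⟩ := by
  have hsplit : pvBuildB edges =
      ((List.range edges.length).foldl
        (fun d i => d.modify (pvHead (pvNth edges i)) [] (· ++ [i])) PySem.Dict.empty,
       (List.range edges.length).foldl
        (fun d i => d.modify (pvLast (pvNth edges i)) [] (· ++ [i])) PySem.Dict.empty) := by
    unfold pvBuildB
    exact PySem.List.foldl_prod_mk
      (fun (d : PySem.Dict (Int × Int) (List Nat)) (i : Nat) =>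
        d.modify (pvHead (pvNth edges i)) [] (· ++ [i]))
      (fun (d : PySem.Dict (Int × Int) (List Nat)) (i : Nat) =>
        d.modify (pvLast (pvNth edges i)) [] (· ++ [i])) _ _ _
  have hU : pvU edges (List.replicate edges.length false) = List.range edges.length := by
    refine List.filter_eq_self.mpr (fun j hj => ?_)
    rw [pvGetD_replicate, if_pos (List.mem_range.mp hj)]
    rfl
  refine ⟨by simp, ?_, ?_, ?_⟩
  · rw [hU]
    refine (List.ext_getElem (by simp) ?_).symm
    intro i h1 h2
    simp only [List.getElem_map, List.getElem_range, pvNth]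
    rw [List.getD_eq_getElem _ _ (by simpa using h2)]
  · rw [show (⟨(pvBuildB edges).1, (pvBuildB edges).2,
        List.replicate edges.length false⟩ : PvStB).starts = (pvBuildB edges).1 from rfl,
      hsplit]
    exact pvBuildQInv edges pvHead
  · rw [show (⟨(pvBuildB edges).1, (pvBuildB edges).2,
        List.replicate edges.length false⟩ : PvStB).ends = (pvBuildB edges).2 from rfl,
      hsplit]
    exact pvBuildQInv edges pvLast

-- ===== VERDICT (by name: the statement is the Claim_ definition above) =====
theorem connect_array_edges_spec : Claim_equal_connect_array_edges := by
  intro edges _ _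
  unfold Spec_connect_array_edges connect_array_edges connect_array_edges_alt
  refine pvOuterSim edges (List.range edges.length) edges _ [] (pvInit edges) ?_ List.pairwise_lt_range
  intro j hj
  exact List.mem_of_mem_filter hj
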